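-- pv_equiv track=rewrite | github.com/wo1fsea/TheOldChineseRoom | core/ocr/ocr_naive.py | _find_peeks
-- ===== SOURCE A (Python) =====
-- def _find_peeks(data, min_val=0, min_range=1):
--     start = None
--     peeks = []
--     for i, val in enumerate(data):
--         if val > min_val:
--             if start is None:
--                 start = i
--         else:
--             if start is not None:
--                 if i - start >= min_range:
--                     peeks.append((start, i))
--                 start = None
--
--     return peeks
-- ===== SOURCE B (Python) =====
-- def _find_peeks(data, min_val=0, min_range=1):
--     # Run-length decomposition: split data into maximal runs of equal
--     # (val > min_val) flag, then keep qualifying True runs that do not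
--     # touch the end of the data (matching A, which never emits a run
--     # still open when the loop ends).
--     n = len(data)
--     runs = []
--     i = 0
--     while i < n:
--         flag = data[i] > min_val
--         j = i + 1
--         while j < n and (data[j] > min_val) == flag:
--             j += 1
--         runs.append((flag, i, j))
--         i = j
--     return [(s, e) for flag, s, e in runs if flag and e < n and e - s >= min_range]
-- ===== Notes on version B (the rewrite author's own statement) =====
-- stated objective: alternative
-- what changed: B replaces A's element-by-element state machine (Optional start carried through one enumerate loop) by a two-phase run-length decomposition: first split the data into maximal runs of equal (val > min_val) flag, then filter the True runs by length and by not reaching the end of the data.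
import Mathlib
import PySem

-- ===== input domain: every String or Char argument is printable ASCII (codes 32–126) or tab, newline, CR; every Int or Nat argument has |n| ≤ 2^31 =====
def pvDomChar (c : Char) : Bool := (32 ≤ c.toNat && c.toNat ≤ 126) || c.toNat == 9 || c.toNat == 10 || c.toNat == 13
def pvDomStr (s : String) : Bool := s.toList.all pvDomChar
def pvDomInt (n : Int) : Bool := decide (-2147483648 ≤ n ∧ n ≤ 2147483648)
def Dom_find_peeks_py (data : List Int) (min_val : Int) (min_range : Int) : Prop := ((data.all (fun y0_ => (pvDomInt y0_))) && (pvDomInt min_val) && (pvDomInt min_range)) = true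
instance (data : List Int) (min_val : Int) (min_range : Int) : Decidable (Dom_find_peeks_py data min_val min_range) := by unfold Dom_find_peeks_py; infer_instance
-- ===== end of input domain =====

-- B replaces A's one-pass Optional-start state machine by a two-phase run-length
-- decomposition (split into maximal runs of equal (val > min_val) flag, then filter).

-- ===== PORT A =====
-- the 'for i, val in enumerate(data)' loop with state (start, peeks), as structural recursion
def find_peeks_py_loop (min_val min_range : Int) :
    List Int → Int → Option Int → List (Int × Int) → List (Int × Int)
  | [], _, _, peeks => peeks
  | val :: rest, i, start, peeks =>
    if val > min_val then
      find_peeks_py_loop min_val min_range rest (i + 1)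
        (match start with | none => some i | some s => some s) peeks
    else
      match start with
      | some s =>
          find_peeks_py_loop min_val min_range rest (i + 1) none
            (if i - s ≥ min_range then peeks ++ [(s, i)] else peeks)
      | none => find_peeks_py_loop min_val min_range rest (i + 1) none peeks

def find_peeks_py (data : List Int) (min_val : Int) (min_range : Int) : List (Int × Int) :=
  find_peeks_py_loop min_val min_range data 0 none []

-- ===== PORT B =====
-- the outer while loop of Source B: maximal runs of equal (val > min_val) flag, as (flag, start, end)
def pvRunsB (min_val : Int) : List Int → Int → List (Bool × Int × Int)
  | [], _ => []
  | v :: vs, i =>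
    let flag : Bool := decide (v > min_val)
    -- the inner 'while j < n and (data[j] > min_val) == flag: j += 1'
    let k := (vs.takeWhile (fun w => decide (w > min_val) == flag)).length
    (flag, i, i + 1 + (k : Int)) :: pvRunsB min_val (vs.drop k) (i + 1 + (k : Int))
  termination_by xs => xs.length
  decreasing_by simp

def find_peeks_py_alt (data : List Int) (min_val : Int) (min_range : Int) : List (Int × Int) :=
  let n : Int := data.length
  (pvRunsB min_val data 0).filterMap
    (fun r => if r.1 = true ∧ r.2.2 < n ∧ r.2.2 - r.2.1 ≥ min_range then some (r.2.1, r.2.2) else none)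

-- ===== PRECONDITION & SPEC =====
def Spec_find_peeks_py (data : List Int) (min_val : Int) (min_range : Int) (out : List (Int × Int)) : Prop := out = find_peeks_py_alt data min_val min_range
instance (data : List Int) (min_val : Int) (min_range : Int) (out : List (Int × Int)) : Decidable (Spec_find_peeks_py data min_val min_range out) := by unfold Spec_find_peeks_py; infer_instance

-- ===== CLAIM (what is proved, stated in full; the proofs are below) =====
def Claim_equal_find_peeks_py : Prop := ∀ (data : List Int) (min_val : Int) (min_range : Int), Dom_find_peeks_py data min_val min_range → Spec_find_peeks_py data min_val min_range (find_peeks_py data min_val min_range)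

-- ===== LEMMAS AND PROOFS =====

-- A's loop skips a block of elements all > min_val without changing (some s, peeks)
theorem loop_skip_true (min_val min_range : Int) (xs rest : List Int) (i s : Int)
    (acc : List (Int × Int)) (h : ∀ v ∈ xs, v > min_val) :
    find_peeks_py_loop min_val min_range (xs ++ rest) i (some s) acc
      = find_peeks_py_loop min_val min_range rest (i + xs.length) (some s) acc := by
  induction xs generalizing i with
  | nil => simp
  | cons v vs ih =>
    have hv : v > min_val := h v (by simp)
    simp only [List.cons_append, find_peeks_py_loop, if_pos hv]
    rw [ih (i+1) (fun w hw => h w (List.mem_cons_of_mem _ hw))]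
    congr 1
    simp; omega

-- the filter applied to the run list
def pvRunsFilter (min_range bound : Int) (runs : List (Bool × Int × Int)) : List (Int × Int) :=
  runs.filterMap
    (fun r => if r.1 = true ∧ r.2.2 < bound ∧ r.2.2 - r.2.1 ≥ min_range then some (r.2.1, r.2.2) else none)

-- dropWhile as a drop of the takeWhile length
theorem dropWhile_eq_drop_len (p : Int → Bool) (l : List Int) :
    l.dropWhile p = l.drop (l.takeWhile p).length := by
  induction l with
  | nil => simp
  | cons a l ih => by_cases h : p a <;> simp [h, ih]

-- A's loop skips a block of elements all ≤ min_val with state none unchanged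
theorem loop_skip_false (min_val min_range : Int) (xs rest : List Int) (i : Int)
    (acc : List (Int × Int)) (h : ∀ v ∈ xs, ¬ v > min_val) :
    find_peeks_py_loop min_val min_range (xs ++ rest) i none acc
      = find_peeks_py_loop min_val min_range rest (i + xs.length) none acc := by
  induction xs generalizing i with
  | nil => simp
  | cons v vs ih =>
    have hv : ¬ v > min_val := h v (by simp)
    simp only [List.cons_append, find_peeks_py_loop, if_neg hv]
    rw [ih (i+1) (fun w hw => h w (List.mem_cons_of_mem _ hw))]
    congr 1
    simp; omega

-- the first element surviving dropWhile fails the predicate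
theorem dropWhile_head_not (p : Int → Bool) (l l2 : List Int) (w : Int)
    (h : l.dropWhile p = w :: l2) : p w = false := by
  induction l with
  | nil => simp at h
  | cons a l ih =>
    rw [List.dropWhile_cons] at h
    by_cases hp : p a
    · rw [if_pos hp] at h; exact ih h
    · rw [if_neg hp] at h; cases h; simpa using hp

-- main invariant: A's loop from state none equals acc ++ filtered runs of the suffix
theorem loop_eq_runs (min_val min_range : Int) :
    ∀ (n : Nat) (xs : List Int), xs.length = n → ∀ (i : Int) (acc : List (Int × Int)),
      find_peeks_py_loop min_val min_range xs i none acc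
        = acc ++ pvRunsFilter min_range (i + xs.length) (pvRunsB min_val xs i) := by
  intro n
  induction n using Nat.strong_induction_on with
  | _ n IH =>
  intro xs hn i acc
  subst hn
  match xs with
  | [] => simp [find_peeks_py_loop, pvRunsB, pvRunsFilter]
  | v :: vs =>
    set flag : Bool := decide (v > min_val) with hflag
    set p : Int → Bool := fun w => decide (w > min_val) == flag with hp
    set k := (vs.takeWhile p).length with hk
    have hsplit : vs.takeWhile p ++ vs.drop k = vs := by
      rw [hk, ← dropWhile_eq_drop_len]; exact List.takeWhile_append_dropWhile
    have hkle : k ≤ vs.length := by rw [hk]; exact (List.takeWhile_sublist p).length_le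
    have hklen : k + (vs.drop k).length = vs.length := by rw [List.length_drop]; omega
    have hruns : pvRunsB min_val (v :: vs) i
        = (flag, i, i + 1 + (k : Int)) :: pvRunsB min_val (vs.drop k) (i + 1 + (k : Int)) := by
      rw [pvRunsB]
    have hIH := fun (i' : Int) (acc' : List (Int × Int)) =>
      IH (vs.drop k).length (by simp [List.length_drop]) (vs.drop k) rfl i' acc'
    by_cases hv : v > min_val
    · have hflagT : flag = true := by simp [hflag, hv]
      have htake : ∀ w ∈ vs.takeWhile p, w > min_val := by
        intro w hw
        have := List.mem_takeWhile_imp hw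
        simp [hp, hflagT] at this; exact this
      have hstep : find_peeks_py_loop min_val min_range (v :: vs) i none acc
          = find_peeks_py_loop min_val min_range vs (i + 1) (some i) acc := by
        simp [find_peeks_py_loop, hv]
      have hLHS : find_peeks_py_loop min_val min_range vs (i + 1) (some i) acc
          = find_peeks_py_loop min_val min_range (vs.drop k) (i + 1 + (k : Int)) (some i) acc := by
        conv_lhs => rw [← hsplit]
        rw [loop_skip_true min_val min_range _ _ _ _ _ htake, ← hk]
      rw [hstep, hLHS, hruns]
      rcases hrest : vs.drop k with _ | ⟨w, rest'⟩
      · -- pending True run reaches the end of the data: A drops it, B filters it out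
        have hkv : k = vs.length := by
          have := hklen; rw [hrest] at this; simpa using this
        simp [find_peeks_py_loop, pvRunsB, pvRunsFilter, hkv]
        omega
      · have hw : ¬ w > min_val := by
          have hdw : vs.dropWhile p = w :: rest' := by
            rw [dropWhile_eq_drop_len, ← hk, hrest]
          have := dropWhile_head_not p vs rest' w hdw
          simp [hp, hflagT] at this; omega
        have hstep2 : find_peeks_py_loop min_val min_range (w :: rest') (i + 1 + (k:Int)) (some i) acc
            = find_peeks_py_loop min_val min_range rest' (i + 1 + (k:Int) + 1) none
                (if i + 1 + (k:Int) - i ≥ min_range then acc ++ [(i, i + 1 + (k:Int))] else acc) := by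
          simp only [find_peeks_py_loop, if_neg hw]
        have hstep3 : find_peeks_py_loop min_val min_range (w :: rest') (i + 1 + (k:Int)) none
              (if i + 1 + (k:Int) - i ≥ min_range then acc ++ [(i, i + 1 + (k:Int))] else acc)
            = find_peeks_py_loop min_val min_range rest' (i + 1 + (k:Int) + 1) none
                (if i + 1 + (k:Int) - i ≥ min_range then acc ++ [(i, i + 1 + (k:Int))] else acc) := by
          simp [find_peeks_py_loop, hw]
        rw [hstep2, ← hstep3, ← hrest, hIH]
        have hbound : i + 1 + (k:Int) + ((vs.drop k).length : Int) = i + ((v :: vs).length : Int) := by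
          simp; omega
        rw [hbound]
        have hlt : i + 1 + (k:Int) < i + ((v :: vs).length : Int) := by
          have h1 : (vs.drop k).length ≥ 1 := by rw [hrest]; simp
          simp; omega
        have hlt' : i + 1 + (k:Int) < i + ((vs.length:Int) + 1) := by push_cast at hlt; omega
        simp only [pvRunsFilter, List.filterMap_cons, hflagT]
        by_cases hmr : i + 1 + (k:Int) - i ≥ min_range
        · simp [hmr, hlt']
        · simp [hmr]
    · have hflagF : flag = false := by simp [hflag, hv]
      have htake : ∀ w ∈ vs.takeWhile p, ¬ w > min_val := by
        intro w hw
        have := List.mem_takeWhile_imp hw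
        simp [hp, hflagF] at this; omega
      have hstep : find_peeks_py_loop min_val min_range (v :: vs) i none acc
          = find_peeks_py_loop min_val min_range vs (i + 1) none acc := by
        simp [find_peeks_py_loop, hv]
      have hLHS : find_peeks_py_loop min_val min_range vs (i + 1) none acc
          = find_peeks_py_loop min_val min_range (vs.drop k) (i + 1 + (k : Int)) none acc := by
        conv_lhs => rw [← hsplit]
        rw [loop_skip_false min_val min_range _ _ _ _ htake, ← hk]
      rw [hstep, hLHS, hruns, hIH]
      have hbound : i + 1 + (k:Int) + ((vs.drop k).length : Int) = i + ((v :: vs).length : Int) := by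
        simp; omega
      rw [hbound]
      simp [pvRunsFilter, hflagF]

-- ===== VERDICT (by name: the statement is the Claim_ definition above) =====
theorem find_peeks_py_spec : Claim_equal_find_peeks_py := by
  intro data min_val min_range _
  unfold Spec_find_peeks_py find_peeks_py find_peeks_py_alt
  rw [loop_eq_runs min_val min_range data.length data rfl]
  simp [pvRunsFilter]
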